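-- pv_equiv track=rewrite | github.com/madsaomi/Video_Downloader_Pro | downloader.py | _resolutions_to_labels
-- ===== SOURCE A (Python) =====
-- def _resolutions_to_labels(resolutions):
--     """Превращает список разрешений в красивые лейблы для UI."""
--     labels = []
--     for res in resolutions:
--         if res >= 2160:
--             labels.append(f"{res}p (4K)")
--         elif res >= 1440:
--             labels.append(f"{res}p (2K)")
--         elif res >= 1080:
--             labels.append(f"{res}p (Full HD)")
--         elif res >= 720:
--             labels.append(f"{res}p (HD)")
--         else:
--             labels.append(f"{res}p")
--     labels.append("🎵 Только аудио (MP3)")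
--     return labels if len(labels) > 1 else ["🎵 Только аудио (MP3)"]
-- ===== SOURCE B (Python) =====
-- _THRESH = [720, 1080, 1440, 2160]
-- _SFX = ["", " (HD)", " (Full HD)", " (2K)", " (4K)"]
--
-- def _rank(res):
--     # binary search: number of thresholds <= res
--     lo, hi = 0, len(_THRESH)
--     while lo < hi:
--         mid = (lo + hi) // 2
--         if _THRESH[mid] <= res:
--             lo = mid + 1
--         else:
--             hi = mid
--     return lo
--
-- def _resolutions_to_labels(resolutions):
--     return [f"{res}p{_SFX[_rank(res)]}" for res in resolutions] + ["🎵 Только аудио (MP3)"]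
-- ===== Notes on version B (the rewrite author's own statement) =====
-- stated objective: alternative
-- what changed: Replaced the if/elif cascade with a hand-written binary search (bisection) over a sorted threshold array indexing a parallel suffix table, built via a list comprehension; the redundant len>1 ternary is dropped since the audio entry is always appended.
import Mathlib
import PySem

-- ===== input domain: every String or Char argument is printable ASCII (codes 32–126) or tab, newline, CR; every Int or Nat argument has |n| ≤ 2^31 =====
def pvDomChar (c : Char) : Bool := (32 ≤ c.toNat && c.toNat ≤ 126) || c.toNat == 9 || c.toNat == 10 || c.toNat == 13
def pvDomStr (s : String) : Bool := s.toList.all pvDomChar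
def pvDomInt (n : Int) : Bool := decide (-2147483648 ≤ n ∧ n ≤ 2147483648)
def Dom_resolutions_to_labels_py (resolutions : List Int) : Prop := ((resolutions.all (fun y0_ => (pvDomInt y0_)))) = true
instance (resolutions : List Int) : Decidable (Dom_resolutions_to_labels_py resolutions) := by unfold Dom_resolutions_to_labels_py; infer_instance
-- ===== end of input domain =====

-- B picks each suffix by binary search over a sorted threshold array with a parallel
-- suffix table (alternative algorithm, same cost); A's redundant len>1 ternary is dropped.


-- ===== PORT A =====
def resolutions_to_labels_py (resolutions : List Int) : List String :=
  let labels : List String := resolutions.foldl (fun labels res =>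
    if res ≥ 2160 then labels ++ [PySem.Int.toStr res ++ "p (4K)"]
    else if res ≥ 1440 then labels ++ [PySem.Int.toStr res ++ "p (2K)"]
    else if res ≥ 1080 then labels ++ [PySem.Int.toStr res ++ "p (Full HD)"]
    else if res ≥ 720 then labels ++ [PySem.Int.toStr res ++ "p (HD)"]
    else labels ++ [PySem.Int.toStr res ++ "p"]) []
  let labels := labels ++ ["🎵 Только аудио (MP3)"]
  if labels.length > 1 then labels else ["🎵 Только аудио (MP3)"]

-- ===== PORT B =====
def pvThresh : List Int := [720, 1080, 1440, 2160]
def pvSfx : List String := ["", " (HD)", " (Full HD)", " (2K)", " (4K)"]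

-- binary search: number of thresholds ≤ res (the while loop of Source B's _rank)
def pvRankLoop (res : Int) (lo hi : Nat) : Nat :=
  if _h : lo < hi then
    let mid := (lo + hi) / 2
    if pvThresh.getD mid 0 ≤ res then pvRankLoop res (mid + 1) hi
    else pvRankLoop res lo mid
  else lo
termination_by hi - lo
decreasing_by all_goals omega

def pvRank (res : Int) : Nat := pvRankLoop res 0 pvThresh.length

def resolutions_to_labels_py_alt (resolutions : List Int) : List String :=
  (resolutions.map (fun res => PySem.Int.toStr res ++ "p" ++ pvSfx.getD (pvRank res) ""))
    ++ ["🎵 Только аудио (MP3)"]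

-- ===== PRECONDITION & SPEC =====
def Spec_resolutions_to_labels_py (resolutions : List Int) (out : List String) : Prop := out = resolutions_to_labels_py_alt resolutions
instance (resolutions : List Int) (out : List String) : Decidable (Spec_resolutions_to_labels_py resolutions out) := by unfold Spec_resolutions_to_labels_py; infer_instance

-- ===== CLAIM (what is proved, stated in full; the proofs are below) =====
def Claim_equal_resolutions_to_labels_py : Prop := ∀ (resolutions : List Int), Dom_resolutions_to_labels_py resolutions → Spec_resolutions_to_labels_py resolutions (resolutions_to_labels_py resolutions)

-- ===== LEMMAS AND PROOFS =====

theorem pvRankLoop_unfold (res : Int) (lo hi : Nat) :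
    pvRankLoop res lo hi =
    if lo < hi then
      (if pvThresh.getD ((lo + hi) / 2) 0 ≤ res then pvRankLoop res ((lo + hi) / 2 + 1) hi
       else pvRankLoop res lo ((lo + hi) / 2))
    else lo := by
  rw [pvRankLoop]
  by_cases h : lo < hi <;> simp [h]

theorem pvRank_eval (res : Int) :
    pvRank res = if res ≥ 2160 then 4 else if res ≥ 1440 then 3
      else if res ≥ 1080 then 2 else if res ≥ 720 then 1 else 0 := by
  unfold pvRank
  by_cases h1 : (1440:Int) ≤ res
  · by_cases h2 : (2160:Int) ≤ res <;>
      simp [pvRankLoop_unfold, pvThresh, h1, h2]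
  · by_cases h2 : (1080:Int) ≤ res
    · simp [pvRankLoop_unfold, pvThresh, h1, h2]; omega
    · by_cases h3 : (720:Int) ≤ res <;>
        simp [pvRankLoop_unfold, pvThresh, h1, h2, h3] <;> omega

theorem pvStep_eq_label (res : Int) :
    (if res ≥ 2160 then PySem.Int.toStr res ++ "p (4K)"
     else if res ≥ 1440 then PySem.Int.toStr res ++ "p (2K)"
     else if res ≥ 1080 then PySem.Int.toStr res ++ "p (Full HD)"
     else if res ≥ 720 then PySem.Int.toStr res ++ "p (HD)"
     else PySem.Int.toStr res ++ "p") =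
    PySem.Int.toStr res ++ "p" ++ pvSfx.getD (pvRank res) "" := by
  rw [pvRank_eval]
  split_ifs <;> simp [pvSfx] <;> (rw [String.append_assoc]; congr 1)

theorem pvFoldA_eq_map (l : List Int) (acc : List String) :
    l.foldl (fun labels res =>
      if res ≥ 2160 then labels ++ [PySem.Int.toStr res ++ "p (4K)"]
      else if res ≥ 1440 then labels ++ [PySem.Int.toStr res ++ "p (2K)"]
      else if res ≥ 1080 then labels ++ [PySem.Int.toStr res ++ "p (Full HD)"]
      else if res ≥ 720 then labels ++ [PySem.Int.toStr res ++ "p (HD)"]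
      else labels ++ [PySem.Int.toStr res ++ "p"]) acc =
    acc ++ l.map (fun res => PySem.Int.toStr res ++ "p" ++ pvSfx.getD (pvRank res) "") := by
  induction l generalizing acc with
  | nil => simp
  | cons x xs ih =>
    simp only [List.foldl, List.map]
    rw [show (if x ≥ 2160 then acc ++ [PySem.Int.toStr x ++ "p (4K)"]
      else if x ≥ 1440 then acc ++ [PySem.Int.toStr x ++ "p (2K)"]
      else if x ≥ 1080 then acc ++ [PySem.Int.toStr x ++ "p (Full HD)"]
      else if x ≥ 720 then acc ++ [PySem.Int.toStr x ++ "p (HD)"]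
      else acc ++ [PySem.Int.toStr x ++ "p"]) =
      acc ++ [PySem.Int.toStr x ++ "p" ++ pvSfx.getD (pvRank x) ""] by
        rw [← pvStep_eq_label x]; split_ifs <;> rfl]
    rw [ih]; simp

-- ===== VERDICT (by name: the statement is the Claim_ definition above) =====
theorem resolutions_to_labels_py_spec : Claim_equal_resolutions_to_labels_py := by
  intro resolutions _
  unfold Spec_resolutions_to_labels_py resolutions_to_labels_py resolutions_to_labels_py_alt
  rw [pvFoldA_eq_map]
  cases resolutions with
  | nil => simp
  | cons x xs => simp
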